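-- pv_equiv track=rewrite | github.com/tomhumbert/RRDCollector | reddit_scraper.py | get_window
-- ===== SOURCE A (Python) =====
-- def get_window(text, platformlist):
--     windows = []
--     for p in platformlist:
--         splittext = text.split(p)
--         if len(splittext) > 1:
--             w1,w2="",""
--             for i in range(len(splittext)):
--                 if i == 0:
--                     w1 = " ".join(splittext[i].split()[-6:])
--                 elif i == len(splittext)-1:
--                     w2 = " ".join(splittext[i].split()[:6])
--                     window = f"{w1} {p} {w2}"
--                     windows.append(window)
--                 else:
--                     w2 = " ".join(splittext[i].split()[:6])
--                     window = f"{w1} {p} {w2}"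
--                     windows.append(window)
--                     w1 = " ".join(splittext[i].split()[-6:])
--     return windows
-- ===== SOURCE B (Python) =====
-- def get_window(text, platformlist):
--     # Scans the text with str.find for each platform occurrence and slices the
--     # surrounding segments directly, instead of splitting the whole text.
--     windows = []
--     for p in platformlist:
--         if not p:
--             raise ValueError("empty separator")  # find('') would loop forever
--         rest = text
--         while True:
--             i = rest.find(p)
--             if i == -1:
--                 break
--             left = rest[:i]
--             rest = rest[i + len(p):]
--             j = rest.find(p)
--             right = rest if j == -1 else rest[:j]
--             w1 = " ".join(left.split()[-6:])
--             w2 = " ".join(right.split()[:6])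
--             windows.append(f"{w1} {p} {w2}")
--     return windows
-- ===== Notes on version B (the rewrite author's own statement) =====
-- stated objective: alternative
-- what changed: B drops text.split entirely: it scans the text with str.find, slicing the left segment before each occurrence and the right segment up to the next occurrence, where A splits the text once and runs an indexed first/middle/last state machine over the segment list.
import Mathlib
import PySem

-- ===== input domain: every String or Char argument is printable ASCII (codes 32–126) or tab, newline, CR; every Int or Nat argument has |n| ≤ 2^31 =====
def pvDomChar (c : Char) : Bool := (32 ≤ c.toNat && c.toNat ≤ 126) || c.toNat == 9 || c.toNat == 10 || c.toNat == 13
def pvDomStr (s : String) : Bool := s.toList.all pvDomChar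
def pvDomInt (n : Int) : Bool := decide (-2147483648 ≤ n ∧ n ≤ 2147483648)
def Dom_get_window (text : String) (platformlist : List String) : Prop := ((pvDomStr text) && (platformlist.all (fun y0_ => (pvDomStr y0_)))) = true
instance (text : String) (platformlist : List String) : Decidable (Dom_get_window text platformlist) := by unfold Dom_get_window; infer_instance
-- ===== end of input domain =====

-- B replaces A's split-the-whole-text + indexed first/middle/last state machine by a
-- find-driven scan that slices each occurrence's left and right segment directly
-- (alternative algorithm, same results).

-- ===== PORT A =====
-- the body of A's inner 'for i in range(len(splittext))' loop; state = (w1, w2, windows)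
def aInnerBody (p : String) (splittext : List String)
    (s : String × String × List String) (i : Int) : String × String × List String :=
  if i == 0 then
    (PySem.Str.join " " (PySem.List.slice (PySem.Str.split₀ (PySem.List.pyGetD splittext i "")) (some (-6)) none),
     s.2.1, s.2.2)
  else if i == (splittext.length : Int) - 1 then
    let w2 := PySem.Str.join " " (PySem.List.slice (PySem.Str.split₀ (PySem.List.pyGetD splittext i "")) none (some 6))
    (s.1, w2, s.2.2 ++ [s.1 ++ " " ++ p ++ " " ++ w2])
  else
    let w2 := PySem.Str.join " " (PySem.List.slice (PySem.Str.split₀ (PySem.List.pyGetD splittext i "")) none (some 6))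
    let ws := s.2.2 ++ [s.1 ++ " " ++ p ++ " " ++ w2]
    (PySem.Str.join " " (PySem.List.slice (PySem.Str.split₀ (PySem.List.pyGetD splittext i "")) (some (-6)) none), w2, ws)

def get_window (text : String) (platformlist : List String) : List String :=
  platformlist.foldl (fun windows p =>
    match PySem.Str.split? text p with
    | none => windows   -- p = "": Python raises ValueError here; excluded by Pre_get_window
    | some splittext =>
      if 1 < splittext.length then
        ((PySem.List.pyRange 0 (splittext.length : Int) 1).foldl (aInnerBody p splittext)
          ("", "", windows)).2.2
      else windows) []

-- ===== PORT B =====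
def leftCtx (seg : String) : String :=
  PySem.Str.join " " (PySem.List.slice (PySem.Str.split₀ seg) (some (-6)) none)

def rightCtx (seg : String) : String :=
  PySem.Str.join " " (PySem.List.slice (PySem.Str.split₀ seg) none (some 6))

-- B's 'while True' scanning loop; fuel = len(text) + 1 only makes the recursion
-- structural (each iteration drops at least one character of 'rest')
def bGo (p : String) : Nat → String → List String
  | 0, _ => []
  | fuel+1, rest =>
    let i := PySem.Str.find rest p
    if i == -1 then []
    else
      let left := PySem.Str.slice rest none (some i)
      let rest2 := PySem.Str.slice rest (some (i + PySem.Str.len p)) none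
      let j := PySem.Str.find rest2 p
      let right := if j == -1 then rest2 else PySem.Str.slice rest2 none (some j)
      let w1 := leftCtx left
      let w2 := rightCtx right
      (w1 ++ " " ++ p ++ " " ++ w2) :: bGo p fuel rest2

def get_window_alt (text : String) (platformlist : List String) : List String :=
  platformlist.foldl (fun windows p =>
    if p = "" then windows   -- Python B raises ValueError here; excluded by Pre_get_window
    else windows ++ bGo p (text.toList.length + 1) text) []

-- ===== PRECONDITION & SPEC =====
-- Pre_ excludes only inputs where Python A raises: text.split("") is a ValueError
-- (B raises a ValueError there too).
def Pre_get_window (text : String) (platformlist : List String) : Prop := "" ∉ platformlist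
instance (text : String) (platformlist : List String) : Decidable (Pre_get_window text platformlist) := by unfold Pre_get_window; infer_instance

def pvWitness_get_window : String × List String := ("we saw a red panda today", ["red"])

def Spec_get_window (text : String) (platformlist : List String) (out : List String) : Prop := out = get_window_alt text platformlist
instance (text : String) (platformlist : List String) (out : List String) : Decidable (Spec_get_window text platformlist out) := by unfold Spec_get_window; infer_instance

-- ===== CLAIM (what is proved, stated in full; the proofs are below) =====
def Claim_equal_get_window : Prop := ∀ (text : String) (platformlist : List String), Dom_get_window text platformlist → Pre_get_window text platformlist → Spec_get_window text platformlist (get_window text platformlist)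

-- ===== LEMMAS AND PROOFS =====

-- the common shape both ports are reduced to: one window per adjacent pair of segments
def zipWin (p : String) (parts : List (List Char)) : List String :=
  (parts.zip parts.tail).map
    (fun pr => leftCtx (String.ofList pr.1) ++ " " ++ p ++ " " ++ rightCtx (String.ofList pr.2))

-- ---- A-side: the indexed loop equals the adjacent-pair map ----

-- A's loop body at i = 0 (sets w1)
lemma aBody_zero (p : String) (parts : List String) (s : String × String × List String) :
    aInnerBody p parts s 0 = (leftCtx (parts.getD 0 ""), s.2.1, s.2.2) := by
  simp [aInnerBody, leftCtx, PySem.List.pyGetD_ofNat']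

-- A's loop body at the last index (appends, keeps w1)
lemma aBody_last (p : String) (parts : List String) (s : String × String × List String)
    (i : Nat) (h1 : 1 ≤ i) (h2 : i = parts.length - 1) (h3 : 1 < parts.length) :
    aInnerBody p parts s (i : Int)
      = (s.1, rightCtx (parts.getD i ""),
         s.2.2 ++ [s.1 ++ " " ++ p ++ " " ++ rightCtx (parts.getD i "")]) := by
  have hne : ¬ (((i : Int) == 0) = true) := by simp; omega
  have heq : (((i : Int) == (parts.length : Int) - 1) = true) := by simp; omega
  simp only [aInnerBody, rightCtx, PySem.List.pyGetD_natCast]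
  rw [if_neg hne, if_pos heq]

-- A's loop body at a middle index (appends, then updates w1)
lemma aBody_mid (p : String) (parts : List String) (s : String × String × List String)
    (i : Nat) (h1 : 1 ≤ i) (h2 : i < parts.length - 1) :
    aInnerBody p parts s (i : Int)
      = (leftCtx (parts.getD i ""), rightCtx (parts.getD i ""),
         s.2.2 ++ [s.1 ++ " " ++ p ++ " " ++ rightCtx (parts.getD i "")]) := by
  have hne : ¬ (((i : Int) == 0) = true) := by simp; omega
  have hne' : ¬ (((i : Int) == (parts.length : Int) - 1) = true) := by simp; omega
  simp only [aInnerBody, leftCtx, rightCtx, PySem.List.pyGetD_natCast]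
  rw [if_neg hne, if_neg hne']

-- invariant of A's inner loop: entering iteration m (1 ≤ m) with w1 = leftCtx parts[m-1],
-- the windows accumulator ends as acc ++ the adjacent-pair windows of the remaining segments
lemma inner_eq (p : String) (parts : List String) :
    ∀ (k m : Nat) (w2 : String) (acc : List String),
      parts.length = m + k → 1 ≤ m →
      ((PySem.List.pyRange (m : Int) (parts.length : Int) 1).foldl (aInnerBody p parts)
        (leftCtx (parts.getD (m-1) ""), w2, acc)).2.2
      = acc ++ ((parts.drop (m-1)).zip (parts.drop m)).map
          (fun pr => leftCtx pr.1 ++ " " ++ p ++ " " ++ rightCtx pr.2) := by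
  intro k
  induction k with
  | zero =>
    intro m w2 acc hlen hm
    rw [PySem.List.pyRange_one_eq_nil (by exact_mod_cast (by omega : parts.length ≤ m))]
    simp [List.drop_eq_nil_of_le (by omega : parts.length ≤ m)]
  | succ k ih =>
    intro m w2 acc hlen hm
    have hmlt : m < parts.length := by omega
    have hm1 : m - 1 < parts.length := by omega
    rw [PySem.List.pyRange_one_cons (by exact_mod_cast hmlt), List.foldl_cons]
    rw [List.drop_eq_getElem_cons hm1, show m - 1 + 1 = m from by omega,
        List.drop_eq_getElem_cons hmlt, List.zip_cons_cons, List.map_cons]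
    rw [List.getD_eq_getElem parts "" hm1]
    by_cases hk : k = 0
    · -- i = m is the last index
      subst hk
      rw [aBody_last p parts _ m hm (by omega) (by omega)]
      rw [PySem.List.pyRange_one_eq_nil (by exact_mod_cast (by omega : parts.length ≤ m + 1))]
      rw [List.drop_eq_nil_of_le (by omega : parts.length ≤ m + 1), List.zip_nil_right]
      simp [List.getElem?_eq_getElem hmlt]
    · -- i = m is a middle index
      rw [aBody_mid p parts _ m hm (by omega)]
      rw [show ((m : Int) + 1) = ((m + 1 : Nat) : Int) from by push_cast; ring]
      rw [show (leftCtx (parts.getD m ""), rightCtx (parts.getD m ""),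
            acc ++ [leftCtx (parts[m - 1]) ++ " " ++ p ++ " " ++ rightCtx (parts.getD m "")])
          = (leftCtx (parts.getD (m + 1 - 1) ""), rightCtx (parts.getD m ""),
            acc ++ [leftCtx (parts[m - 1]) ++ " " ++ p ++ " " ++ rightCtx (parts.getD m "")])
          from by norm_num]
      rw [ih (m + 1) _ _ (by omega) (by omega)]
      simp [List.getElem?_eq_getElem hmlt]

-- A's whole per-platform computation, in adjacent-pair form over the char-level segments
lemma a_step_eq (text p : String) (windows : List String) :
    (match PySem.Str.split? text p with
     | none => windows
     | some splittext =>
       if 1 < splittext.length then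
         ((PySem.List.pyRange 0 (splittext.length : Int) 1).foldl (aInnerBody p splittext)
           ("", "", windows)).2.2
       else windows)
    = (match PySem.Str.split? text p with
       | none => windows
       | some parts => windows ++ (parts.zip parts.tail).map
           (fun pr => leftCtx pr.1 ++ " " ++ p ++ " " ++ rightCtx pr.2)) := by
  cases h : PySem.Str.split? text p with
  | none => rfl
  | some parts =>
    simp only []
    by_cases hl : 1 < parts.length
    · rw [if_pos hl]
      rw [PySem.List.pyRange_one_cons (by exact_mod_cast (by omega : 0 < parts.length)),
          List.foldl_cons, aBody_zero]
      rw [show ((0 : Int) + 1) = ((1 : Nat) : Int) from by norm_num]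
      rw [inner_eq p parts (parts.length - 1) 1 "" windows (by omega) (by omega)]
      simp [List.drop_one]
    · rw [if_neg hl]
      cases parts with
      | nil => simp
      | cons x t =>
        cases t with
        | nil => simp
        | cons y t' => exact absurd (by simp) hl

-- ---- find/splitOn toolbox ----

lemma find_nil_of_ne (sub : List Char) (h : sub ≠ []) : PySem.Chars.find [] sub = -1 := by
  simp [PySem.Chars.find, PySem.Chars.find.go, h]

lemma find_zero_of_prefix (sub l : List Char) (hs : sub ≠ []) (h : sub.isPrefixOf l) :
    PySem.Chars.find l sub = 0 := by
  cases l with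
  | nil =>
    exact absurd (List.isPrefixOf_iff_prefix.mp h) (by simpa using hs)
  | cons c t =>
    unfold PySem.Chars.find
    rw [PySem.Chars.find.go, if_pos h]
    simp

lemma find_go_shift (sub : List Char) (hs : sub ≠ []) :
    ∀ (l : List Char) (k : Nat),
      PySem.Chars.find.go sub l k
        = if PySem.Chars.find.go sub l 0 = -1 then -1 else PySem.Chars.find.go sub l 0 + k := by
  intro l
  induction l with
  | nil =>
    intro k
    have h1 : ∀ m : Nat, PySem.Chars.find.go sub [] m = -1 := by
      intro m; rw [PySem.Chars.find.go]; simp [hs]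
    simp [h1]
  | cons c t ih =>
    intro k
    rw [PySem.Chars.find.go]
    by_cases hp : sub.isPrefixOf (c :: t)
    · rw [if_pos hp]
      conv_rhs => rw [PySem.Chars.find.go, if_pos hp]
      simp
    · rw [if_neg hp]
      conv_rhs => rw [PySem.Chars.find.go, if_neg hp]
      rw [ih (k + 1), ih 1]
      have hlb := PySem.Chars.neg_one_le_find t sub
      simp only [PySem.Chars.find] at hlb
      push_cast
      split_ifs <;> omega

lemma find_cons_of_not_prefix (sub : List Char) (c : Char) (t : List Char)
    (hs : sub ≠ []) (hp : ¬ sub.isPrefixOf (c :: t)) :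
    PySem.Chars.find (c :: t) sub
      = if PySem.Chars.find t sub = -1 then -1 else PySem.Chars.find t sub + 1 := by
  unfold PySem.Chars.find
  rw [PySem.Chars.find.go, if_neg hp, find_go_shift sub hs t 1]
  norm_num

lemma find_fit (l sub : List Char)
    (h : PySem.Chars.find l sub ≠ -1) :
    (PySem.Chars.find l sub).toNat + sub.length ≤ l.length := by
  have h0 : 0 ≤ PySem.Chars.find l sub := by
    have := PySem.Chars.neg_one_le_find l sub
    omega
  obtain ⟨hpre, -⟩ := PySem.Chars.find_spec (s := l) (sub := sub) h0
  have hlen := hpre.length_le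
  have hle := PySem.Chars.find_le_length l sub
  rw [List.length_drop] at hlen
  omega

lemma splitOn_go_master (sep : List Char) (hs : sep ≠ []) :
    ∀ (n : Nat) (l : List Char) (cur : List Char) (acc : List (List Char)) (fuel : Nat),
      l.length = n → l.length < fuel →
      PySem.Chars.splitOn.go sep fuel l cur acc
        = if PySem.Chars.find l sep = -1 then acc.reverse ++ [cur.reverse ++ l]
          else acc.reverse ++ ((cur.reverse ++ l.take (PySem.Chars.find l sep).toNat)
               :: PySem.Chars.splitOn (l.drop ((PySem.Chars.find l sep).toNat + sep.length)) sep) := by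
  intro n
  induction n using Nat.strong_induction_on with
  | _ n ih =>
    intro l cur acc fuel hn hfuel
    obtain ⟨f, rfl⟩ : ∃ f, fuel = f + 1 := ⟨fuel - 1, by omega⟩
    have hsl : 0 < sep.length := List.length_pos_iff.mpr hs
    cases l with
    | nil =>
      rw [show PySem.Chars.splitOn.go sep (f+1) [] cur acc = (cur.reverse :: acc).reverse
          from by rw [PySem.Chars.splitOn.go]; omega]
      simp [find_nil_of_ne sep hs]
    | cons c t =>
      have hlen : (c :: t).length = t.length + 1 := rfl
      rw [PySem.Chars.splitOn.go]
      by_cases hp : sep.isPrefixOf (c :: t)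
      · rw [if_pos hp]
        have hfind : PySem.Chars.find (c :: t) sep = 0 := find_zero_of_prefix sep _ hs hp
        set d := List.drop sep.length (c :: t) with hd_def
        have hdlen : d.length = (c :: t).length - sep.length := by
          rw [hd_def, List.length_drop]
        have hd : d.length < n := by omega
        have hdf : d.length < f := by omega
        rw [ih _ hd d [] (cur.reverse :: acc) f rfl hdf]
        have hsplit : PySem.Chars.splitOn d sep
            = if PySem.Chars.find d sep = -1 then [d]
              else d.take (PySem.Chars.find d sep).toNat
                   :: PySem.Chars.splitOn (d.drop ((PySem.Chars.find d sep).toNat + sep.length)) sep := by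
          conv_lhs => rw [PySem.Chars.splitOn]
          rw [ih _ hd d [] [] (d.length + 1) rfl (by omega)]
          by_cases hf : PySem.Chars.find d sep = -1 <;> simp [hf]
        rw [hfind]
        rw [if_neg (show ¬(0:Int) = -1 by norm_num)]
        have hd' : List.drop ((0:Int).toNat + sep.length) (c :: t) = d := by
          simp [hd_def]
        rw [hd', hsplit]
        by_cases hf : PySem.Chars.find d sep = -1 <;> simp [hf]
      · rw [if_neg hp]
        have ht : t.length < n := by omega
        rw [ih _ ht t (c :: cur) acc f rfl (by omega)]
        rw [find_cons_of_not_prefix sep c t hs hp]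
        by_cases hf : PySem.Chars.find t sep = -1
        · simp [hf]
        · have h0 : 0 ≤ PySem.Chars.find t sep := by
            have := PySem.Chars.neg_one_le_find t sep
            omega
          have hne : ¬ (PySem.Chars.find t sep + 1 = -1) := by omega
          simp only [hf, if_false, hne]
          have htoNat : (PySem.Chars.find t sep + 1).toNat = (PySem.Chars.find t sep).toNat + 1 := by
            omega
          rw [htoNat]
          simp only [List.take_succ_cons]
          rw [show (PySem.Chars.find t sep).toNat + 1 + sep.length
              = ((PySem.Chars.find t sep).toNat + sep.length) + 1 from by omega,
            List.drop_succ_cons]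
          simp

lemma splitOn_step (sep l : List Char) (hs : sep ≠ []) :
    PySem.Chars.splitOn l sep
      = if PySem.Chars.find l sep = -1 then [l]
        else l.take (PySem.Chars.find l sep).toNat
             :: PySem.Chars.splitOn (l.drop ((PySem.Chars.find l sep).toNat + sep.length)) sep := by
  conv_lhs => rw [PySem.Chars.splitOn]
  rw [splitOn_go_master sep hs l.length l [] [] (l.length + 1) rfl (by omega)]
  by_cases hf : PySem.Chars.find l sep = -1 <;> simp [hf]

-- ---- B-side: the find-driven scan equals the adjacent-pair map ----

lemma bGo_eq (p : String) (hp : p.toList ≠ []) :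
    ∀ (fuel : Nat) (rest : String), rest.toList.length < fuel →
      bGo p fuel rest = zipWin p (PySem.Chars.splitOn rest.toList p.toList) := by
  intro fuel
  induction fuel with
  | zero => intro rest h; omega
  | succ fuel ih =>
    intro rest hfuel
    rw [bGo]
    simp only [PySem.Str.find]
    by_cases hf : PySem.Chars.find rest.toList p.toList = -1
    · rw [if_pos (by simp [hf])]
      rw [zipWin, splitOn_step _ _ hp, if_pos hf]
      simp
    · rw [if_neg (by simp [hf])]
      have h0 : 0 ≤ PySem.Chars.find rest.toList p.toList := by
        have := PySem.Chars.neg_one_le_find rest.toList p.toList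
        omega
      set i := PySem.Chars.find rest.toList p.toList with hi
      set k := i.toNat with hk
      have hfit := find_fit rest.toList p.toList hf
      have hplen : 0 < p.toList.length := List.length_pos_iff.mpr hp
      have hrlen : 0 < rest.toList.length := by omega
      -- the sliced remainder
      have hrest2 : (PySem.Str.slice rest (some (i + PySem.Str.len p)) none).toList
          = rest.toList.drop (k + p.toList.length) := by
        rw [PySem.Str.toList_slice, PySem.Chars.slice_eq_listSlice,
            PySem.List.slice_from _ (by simp [PySem.Str.len]; omega)]
        congr 1
        simp [PySem.Str.len]
        omega
      set rest2 := PySem.Str.slice rest (some (i + PySem.Str.len p)) none with hrest2def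
      have hR2 : rest2 = String.ofList (rest.toList.drop (k + p.toList.length)) := by
        rw [← hrest2]
        exact String.ofList_toList.symm
      have hleft : (PySem.Str.slice rest none (some i)).toList = rest.toList.take k := by
        rw [PySem.Str.toList_slice, PySem.Chars.slice_eq_listSlice, PySem.List.slice_to _ h0]
      have hLs : PySem.Str.slice rest none (some i) = String.ofList (rest.toList.take k) := by
        rw [← hleft]
        exact String.ofList_toList.symm
      -- unfold splitOn once
      rw [splitOn_step _ _ hp, if_neg hf, ← hi, ← hk]
      -- the recursive call
      have hlt : rest2.toList.length < fuel := by
        rw [hrest2, List.length_drop]; omega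
      have hrec : bGo p fuel rest2 = zipWin p (PySem.Chars.splitOn rest2.toList p.toList) :=
        ih rest2 hlt
      -- head of the tail of the split
      rw [zipWin, splitOn_step (p.toList) (rest.toList.drop (k + p.toList.length)) hp]
      have hjC : PySem.Chars.find rest2.toList p.toList
          = PySem.Chars.find (rest.toList.drop (k + p.toList.length)) p.toList := by
        rw [hrest2]
      by_cases hj : PySem.Chars.find (rest.toList.drop (k + p.toList.length)) p.toList = -1
      · -- no further occurrence: exactly one window
        rw [if_pos hj]
        have hbool : (PySem.Chars.find rest2.toList p.toList == -1) = true := by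
          rw [hjC, hj]
          decide
        rw [if_pos hbool]
        rw [hrec, hrest2, splitOn_step _ _ hp, if_pos hj]
        simp only [zipWin, List.zip_cons_cons, List.tail_cons, List.zip_nil_right,
          List.map_cons, List.map_nil]
        rw [hLs, hR2]
      · -- another occurrence: the right context is cut at it
        rw [if_neg hj]
        have hbool : ¬ ((PySem.Chars.find rest2.toList p.toList == -1) = true) := by
          rw [hjC]
          simpa using hj
        rw [if_neg hbool]
        have hj0 : 0 ≤ PySem.Chars.find (rest.toList.drop (k + p.toList.length)) p.toList := by
          have := PySem.Chars.neg_one_le_find (rest.toList.drop (k + p.toList.length)) p.toList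
          omega
        have hright : (PySem.Str.slice rest2 none (some (PySem.Chars.find (rest.toList.drop (k + p.toList.length)) p.toList))).toList
            = (rest.toList.drop (k + p.toList.length)).take
                ((PySem.Chars.find (rest.toList.drop (k + p.toList.length)) p.toList).toNat) := by
          rw [PySem.Str.toList_slice, PySem.Chars.slice_eq_listSlice]
          rw [PySem.List.slice_to _ hj0, hrest2]
        have hRt : PySem.Str.slice rest2 none (some (PySem.Chars.find (rest.toList.drop (k + p.toList.length)) p.toList))
            = String.ofList ((rest.toList.drop (k + p.toList.length)).take
                ((PySem.Chars.find (rest.toList.drop (k + p.toList.length)) p.toList).toNat)) := by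
          rw [← hright]
          exact String.ofList_toList.symm
        rw [hrec, hrest2, splitOn_step _ _ hp, if_neg hj]
        simp only [zipWin, List.zip_cons_cons, List.tail_cons, List.map_cons]
        rw [hLs, hRt]

-- ---- combining the two sides ----

lemma step_eq (text p : String) (hp : p ≠ "") (windows : List String) :
    (match PySem.Str.split? text p with
     | none => windows
     | some splittext =>
       if 1 < splittext.length then
         ((PySem.List.pyRange 0 (splittext.length : Int) 1).foldl (aInnerBody p splittext)
           ("", "", windows)).2.2
       else windows)
    = if p = "" then windows else windows ++ bGo p (text.toList.length + 1) text := by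
  rw [a_step_eq, if_neg hp]
  have hpl : p.toList ≠ [] := fun h => hp (String.toList_eq_nil_iff.mp h)
  have hsome : PySem.Str.split? text p
      = some ((PySem.Chars.splitOn text.toList p.toList).map String.ofList) := by
    simp [PySem.Str.split?, PySem.Chars.split?, List.isEmpty_eq_false_iff.mpr hpl]
  rw [hsome]
  simp only []
  rw [bGo_eq p hpl (text.toList.length + 1) text (by omega)]
  congr 1
  rw [zipWin]
  rw [← List.map_tail, List.zip_map, List.map_map]
  simp [Prod.map]

-- ===== VERDICT (by name: the statement is the Claim_ definition above) =====
theorem get_window_spec : Claim_equal_get_window := by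
  intro text platformlist _ _
  unfold Spec_get_window get_window get_window_alt
  rename_i hpre
  exact PySem.List.foldl_congr_mem _ _ _ _
    (fun acc p hmem => step_eq text p (fun h => hpre (h ▸ hmem)) acc)
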